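-- pv_equiv track=rewrite | github.com/mrtran22dev/TD-Ameritrade-Bot | venv/lib/python3.9/site-packages/baseline/_baseline.py | _dedent
-- ===== SOURCE A (Python) =====
-- def _dedent(text):
--     """Remove common indentation from each line in a text block.
--
--     When text block is a single line, return text block. Otherwise
--     determine common indentation from last line, strip common
--     indentation from each line, and return text block consisting of
--     inner lines (don't include first and last lines since they either
--     empty or contain whitespace and are present in baselined
--     string to make them pretty and delineate the common indentation).
--
--     :param str text: text block
--     :returns: text block with common indentation removed
--     :rtype: str
--     :raises ValueError: when text block violates whitespace rules
--
--     """
--     lines = text.split('\n')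
--
--     if len(lines) == 1:
--         indent = 0
--
--     elif lines[0].strip():
--         raise ValueError('when multiple lines in baseline text, first line must be blank')
--
--     elif lines[-1].strip():
--         raise ValueError('last line in baseline text must only contain indent whitespace')
--
--     else:
--         indent = len(lines[-1])
--
--         if any(line[:indent].strip() for line in lines):
--             raise ValueError(
--                 'indents must equal or exceed indent in last line of baseline text')
--
--         lines = [line[indent:] for line in lines][1:-1]
--
--     return indent, '\n'.join(lines)
-- ===== SOURCE B (Python) =====
-- def _dedent(text):
--     # Character-level state machine: never splits the text into a list of lines.
--     # Pass 1 counts newlines and measures the last line; pass 2 walks the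
--     # characters once with (line, col) state, validating whitespace and
--     # emitting the dedented interior characters directly.
--     n_nl = 0
--     indent = 0
--     for ch in text:
--         if ch == '\n':
--             n_nl += 1
--             indent = 0
--         else:
--             indent += 1
--     if n_nl == 0:
--         return 0, text
--     out = []
--     line = 0
--     col = 0
--     for ch in text:
--         if ch == '\n':
--             if 1 <= line < n_nl - 1:
--                 out.append('\n')
--             line += 1
--             col = 0
--         else:
--             if line == 0 or line == n_nl or col < indent:
--                 if not ch.isspace():
--                     if line == 0:
--                         raise ValueError('when multiple lines in baseline text, first line must be blank')
--                     if line == n_nl: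
--                         raise ValueError('last line in baseline text must only contain indent whitespace')
--                     raise ValueError(
--                         'indents must equal or exceed indent in last line of baseline text')
--             elif 1 <= line < n_nl:
--                 out.append(ch)
--             col += 1
--     return indent, ''.join(out)
-- ===== Notes on version B (the rewrite author's own statement) =====
-- stated objective: alternative
-- what changed: A splits the text into a list of lines, validates with an any() scan over line prefixes and builds the result with a full-list comprehension plus a [1:-1] slice and join; B never builds a line list: it walks the characters twice, first counting newlines and measuring the last line, then a single (line, col) state machine that validates whitespace and emits the dedented interior characters directly.
import Mathlib
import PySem

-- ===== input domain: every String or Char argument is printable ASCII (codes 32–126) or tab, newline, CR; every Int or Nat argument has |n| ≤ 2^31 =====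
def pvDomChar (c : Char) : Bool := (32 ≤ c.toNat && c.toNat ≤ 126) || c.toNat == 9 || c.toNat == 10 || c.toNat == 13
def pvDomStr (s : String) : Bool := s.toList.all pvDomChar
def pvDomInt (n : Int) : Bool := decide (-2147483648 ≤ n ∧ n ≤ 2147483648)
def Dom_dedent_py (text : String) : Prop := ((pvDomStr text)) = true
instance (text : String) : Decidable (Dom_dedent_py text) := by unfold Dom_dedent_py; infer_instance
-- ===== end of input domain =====

-- B is a character-level state machine: it never splits the text into a list of lines;
-- one pass counts newlines and measures the last line, a second pass walks the characters
-- with (line, col) state, validating whitespace and emitting the dedented interior directly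
-- (objective: alternative).
-- On inputs where the Python raises ValueError both ports return a dummy (0, ""); Pre_ excludes those inputs.

-- ===== PORT A =====
def dedent_py (text : String) : Int × String :=
  let lines : List String := (PySem.Chars.splitOn text.toList ['\n']).map String.ofList
  if lines.length = 1 then
    (0, PySem.Str.join "\n" lines)
  else if PySem.Str.strip (PySem.List.pyGetD lines 0 "") ≠ "" then
    (0, "")  -- raise ValueError('when multiple lines …'): excluded by Pre_
  else if PySem.Str.strip (PySem.List.pyGetD lines (-1) "") ≠ "" then
    (0, "")  -- raise ValueError('last line …'): excluded by Pre_
  else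
    let indent : Int := PySem.Str.len (PySem.List.pyGetD lines (-1) "")
    if lines.any (fun line => PySem.Str.strip (PySem.Str.slice line none (some indent)) != "") then
      (0, "")  -- raise ValueError('indents must …'): excluded by Pre_
    else
      let lines2 : List String :=
        PySem.List.slice (lines.map (fun line => PySem.Str.slice line (some indent) none)) (some 1) (some (-1))
      (indent, PySem.Str.join "\n" lines2)

-- ===== PORT B =====
-- pass 2 of Source B: the (line, col) machine over the characters; none = the ValueError
def dedentRun (ind n : Nat) : Nat → Nat → List Char → Option (List Char)
  | _, _, [] => some []
  | line, col, c :: r =>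
    if c = '\n' then
      if 1 ≤ line ∧ line < n - 1 then
        match dedentRun ind n (line + 1) 0 r with
        | none => none
        | some o => some ('\n' :: o)
      else dedentRun ind n (line + 1) 0 r
    else
      if line = 0 ∨ line = n ∨ col < ind then
        if ¬ (PySem.Chars.isspace c) then none  -- raise ValueError: excluded by Pre_
        else dedentRun ind n line (col + 1) r
      else if 1 ≤ line ∧ line < n then
        match dedentRun ind n line (col + 1) r with
        | none => none
        | some o => some (c :: o)
      else dedentRun ind n line (col + 1) r

def dedent_py_alt (text : String) : Int × String :=
  let cs := text.toList
  -- pass 1 of Source B: n_nl = number of newlines, indent = chars since the last newline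
  let st := cs.foldl (fun (st : Nat × Nat) c => if c = '\n' then (st.1 + 1, 0) else (st.1, st.2 + 1)) (0, 0)
  if st.1 = 0 then (0, text)
  else
    match dedentRun st.2 st.1 0 0 cs with
    | none => (0, "")  -- raise ValueError: excluded by Pre_
    | some out => ((st.2 : Int), String.ofList out)

-- ===== PRECONDITION & SPEC =====
-- Pre_ excludes exactly the inputs on which the Python raises ValueError (non-blank first or
-- last line of a multiline block, or a line not starting with the last line's indent).
def Pre_dedent_py (text : String) : Prop :=
  let lines : List String := (PySem.Chars.splitOn text.toList ['\n']).map String.ofList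
  lines.length = 1 ∨
    (PySem.Str.strip (PySem.List.pyGetD lines 0 "") = "" ∧
     PySem.Str.strip (PySem.List.pyGetD lines (-1) "") = "" ∧
     ∀ line ∈ lines,
       PySem.Str.strip (PySem.Str.slice line none
         (some (PySem.Str.len (PySem.List.pyGetD lines (-1) "")))) = "")
instance (text : String) : Decidable (Pre_dedent_py text) := by unfold Pre_dedent_py; infer_instance
def pvWitness_dedent_py : String := "\n  ab\n   cd\n  "
def Spec_dedent_py (text : String) (out : Int × String) : Prop := out = dedent_py_alt text
instance (text : String) (out : Int × String) : Decidable (Spec_dedent_py text out) := by unfold Spec_dedent_py; infer_instance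

-- ===== CLAIM (what is proved, stated in full; the proofs are below) =====
def Claim_equal_dedent_py : Prop := ∀ (text : String), Dom_dedent_py text → Pre_dedent_py text → Spec_dedent_py text (dedent_py text)

-- ===== LEMMAS AND PROOFS =====

-- intercalate over a cons with nonempty tail
lemma intercalate_cons2 (p q : List Char) (ps : List (List Char)) :
    ['\n'].intercalate (p :: q :: ps) = p ++ '\n' :: ['\n'].intercalate (q :: ps) := by
  simp [List.intercalate]

lemma headI_tail_eq {α : Type} [Inhabited α] (l : List α) (h : l ≠ []) : l.headI :: l.tail = l := by
  cases l
  · simp at h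
  · simp

-- the list of '\n'-separated pieces of a character list, by structural recursion
def splitNl : List Char → List (List Char)
  | [] => [[]]
  | c :: r =>
    if c = '\n' then [] :: splitNl r
    else
      match splitNl r with
      | [] => [[c]]
      | p :: ps => (c :: p) :: ps

lemma splitNl_ne_nil (s : List Char) : splitNl s ≠ [] := by
  cases s with
  | nil => simp [splitNl]
  | cons c r =>
    simp only [splitNl]
    split
    · simp
    · cases h : splitNl r <;> simp

lemma splitNl_nl (r : List Char) : splitNl ('\n' :: r) = [] :: splitNl r := by
  simp [splitNl]

lemma splitNl_cons (c : Char) (r : List Char) (hc : c ≠ '\n') :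
    splitNl (c :: r) = (c :: (splitNl r).headI) :: (splitNl r).tail := by
  simp only [splitNl, if_neg hc]
  cases h : splitNl r with
  | nil => exact absurd h (splitNl_ne_nil r)
  | cons p ps => simp

lemma intercalate_splitNl (s : List Char) : List.intercalate ['\n'] (splitNl s) = s := by
  induction s with
  | nil => simp [splitNl, List.intercalate]
  | cons c r ih =>
    by_cases hc : c = '\n'
    · subst hc
      rw [splitNl_nl]
      cases h : splitNl r with
      | nil => exact absurd h (splitNl_ne_nil r)
      | cons p ps =>
        rw [h] at ih
        rw [intercalate_cons2, ih]
        simp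
    · rw [splitNl_cons c r hc]
      cases h : (splitNl r).tail with
      | nil =>
        have hr : splitNl r = [(splitNl r).headI] := by
          conv_lhs => rw [← headI_tail_eq _ (splitNl_ne_nil r)]
          rw [h]
        rw [hr] at ih
        simp only [List.intercalate] at ih ⊢
        simpa using congrArg (c :: ·) ih
      | cons q qs =>
        have hr : splitNl r = (splitNl r).headI :: q :: qs := by
          conv_lhs => rw [← headI_tail_eq _ (splitNl_ne_nil r)]
          rw [h]
        rw [hr] at ih
        rw [intercalate_cons2] at ih
        rw [intercalate_cons2]
        simp [ih]

lemma not_mem_splitNl (s : List Char) (p : List Char) (hp : p ∈ splitNl s) : '\n' ∉ p := by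
  induction s generalizing p with
  | nil => simp [splitNl] at hp; simp [hp]
  | cons c r ih =>
    by_cases hc : c = '\n'
    · subst hc
      rw [splitNl_nl] at hp
      rcases List.mem_cons.mp hp with h | h
      · simp [h]
      · exact ih p h
    · rw [splitNl_cons c r hc] at hp
      rcases List.mem_cons.mp hp with h' | h'
      · subst h'
        intro hm
        rcases List.mem_cons.mp hm with h2 | h2
        · exact hc h2.symm
        · exact ih (splitNl r).headI
            (by rw [← headI_tail_eq _ (splitNl_ne_nil r)]; exact List.mem_cons_self) h2
      · exact ih p (by rw [← headI_tail_eq _ (splitNl_ne_nil r)]; exact List.mem_cons.mpr (Or.inr h'))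

lemma length_splitNl (s : List Char) : (splitNl s).length = s.count '\n' + 1 := by
  induction s with
  | nil => simp [splitNl]
  | cons c r ih =>
    by_cases hc : c = '\n'
    · subst hc; rw [splitNl_nl]; simp [ih]
    · rw [splitNl_cons c r hc]
      have h2 := congrArg List.length (headI_tail_eq _ (splitNl_ne_nil r))
      have hcnt : (c :: r).count '\n' = r.count '\n' := by
        simp [List.count_cons, hc, Ne.symm hc]
      simp only [List.length_cons] at h2 ⊢
      rw [hcnt]
      omega

-- splitOn.go with enough fuel is splitNl with the pending chunk cur and accumulator acc
lemma splitOn_go_eq (fuel : Nat) (l cur : List Char) (acc : List (List Char))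
    (hf : l.length < fuel) :
    PySem.Chars.splitOn.go ['\n'] fuel l cur acc =
      acc.reverse ++ (cur.reverse ++ (splitNl l).headI) :: (splitNl l).tail := by
  induction fuel generalizing l cur acc with
  | zero => omega
  | succ fuel ih =>
    cases l with
    | nil => simp [PySem.Chars.splitOn.go, splitNl]
    | cons c rest =>
      rw [PySem.Chars.splitOn.go]
      by_cases hc : c = '\n'
      · subst hc
        rw [if_pos (by simp [List.isPrefixOf])]
        have hdrop : List.drop (['\n'].length) ('\n' :: rest) = rest := by simp
        rw [hdrop, ih rest [] (List.reverse cur :: acc) (by simp at hf ⊢; omega)]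
        have hne := splitNl_ne_nil rest
        rw [splitNl_nl]
        simp only [List.reverse_cons, List.append_assoc, List.singleton_append, List.headI_cons,
          List.tail_cons, List.append_nil, List.reverse_nil, List.nil_append]
        rw [headI_tail_eq _ hne]
      · rw [if_neg (by simp [List.isPrefixOf, Ne.symm hc])]
        rw [ih rest (c :: cur) acc (by simp at hf ⊢; omega)]
        have hne := splitNl_ne_nil rest
        simp only [splitNl, if_neg hc]
        cases h : splitNl rest with
        | nil => exact absurd h hne
        | cons p ps => simp [h]

lemma splitOn_eq_splitNl (s : List Char) :
    PySem.Chars.splitOn s ['\n'] = splitNl s := by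
  rw [PySem.Chars.splitOn, splitOn_go_eq (s.length + 1) s [] [] (by omega)]
  have hne := splitNl_ne_nil s
  simp only [List.reverse_nil, List.nil_append]
  exact headI_tail_eq _ hne

-- strip is empty iff every character is whitespace
lemma strip_eq_nil_iff (cs : List Char) :
    PySem.Chars.strip cs = [] ↔ ∀ c ∈ cs, PySem.Chars.isspace c = true := by
  constructor
  · intro h
    have hrev : List.dropWhile PySem.Chars.isspace (List.dropWhile PySem.Chars.isspace cs).reverse = [] := by
      have h2 : ((List.dropWhile PySem.Chars.isspace (List.dropWhile PySem.Chars.isspace cs).reverse).reverse).reverse = [] := by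
        simpa [PySem.Chars.strip, PySem.Chars.rstrip, PySem.Chars.lstrip] using h
      simpa using h2
    have hall : ∀ c ∈ List.dropWhile PySem.Chars.isspace cs, PySem.Chars.isspace c = true := by
      intro c hc
      exact List.dropWhile_eq_nil_iff.mp hrev c (List.mem_reverse.mpr hc)
    have hl : List.dropWhile PySem.Chars.isspace cs = [] := by
      by_contra hl
      have hhead := List.head_dropWhile_not PySem.Chars.isspace (l := cs) hl
      have htrue := hall _ (List.head_mem hl)
      simp [htrue] at hhead
    intro c hc
    exact List.dropWhile_eq_nil_iff.mp hl c hc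
  · intro h
    have hl : PySem.Chars.lstrip cs = [] :=
      List.dropWhile_eq_nil_iff.mpr (fun c hc => h c hc)
    simp [PySem.Chars.strip, hl, PySem.Chars.rstrip]

-- indexing helpers for A's lines
lemma pyGetD_zero_of_ne_nil {α : Type} [Inhabited α] (l : List α) (d : α) (h : l ≠ []) :
    PySem.List.pyGetD l 0 d = l.headI := by
  cases l with
  | nil => exact absurd rfl h
  | cons a t =>
    rw [PySem.List.pyGetD_of_nonneg (a :: t) d (by norm_num)]
    simp

lemma pyGetD_neg_one_of_ne_nil {α : Type} (l : List α) (d : α) (h : l ≠ []) :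
    PySem.List.pyGetD l (-1) d = l.getLast h := by
  have hlen : 1 ≤ l.length := List.length_pos_iff.mpr h
  simp only [PySem.List.pyGetD, PySem.List.pyGet?, PySem.List.pyIdx?]
  rw [if_neg (by norm_num), if_pos (by push_cast; omega)]
  have h1 : (-(-1 : Int)).toNat = 1 := by norm_num
  rw [h1]
  show (l[l.length - 1]?).getD d = l.getLast h
  rw [List.getElem?_eq_getElem (by omega), List.getLast_eq_getElem]
  rfl

-- lists slice [1:-1] is tail.dropLast
lemma slice_one_neg_one {α : Type} (xs : List α) :
    PySem.List.slice xs (some 1) (some (-1)) = xs.tail.dropLast := by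
  rcases xs with _ | ⟨a, t⟩
  · simp [PySem.List.slice, PySem.List.clampIdx]
  · simp only [PySem.List.slice, PySem.List.clampIdx]
    norm_num
    rw [List.dropLast_eq_take]
    congr 1

-- ===== pass 1 of B: the fold computes (newline count, last-piece length) =====
lemma getLast_eq_getLastD {α : Type} (l : List α) (h : l ≠ []) (d : α) :
    l.getLast h = l.getLastD d := by
  rw [List.getLastD_eq_getLast?, List.getLast?_eq_some_getLast h]
  rfl

lemma getLastD_cons_ne {α : Type} (a : α) (l : List α) (d : α) (h : l ≠ []) :
    (a :: l).getLastD d = l.getLastD d := by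
  cases l
  · simp at h
  · simp

lemma foldl_pass1 (s : List Char) (k i : Nat) :
    s.foldl (fun (st : Nat × Nat) c => if c = '\n' then (st.1 + 1, 0) else (st.1, st.2 + 1)) (k, i) =
      (k + s.count '\n',
       ((splitNl s).getLastD []).length + (if s.count '\n' = 0 then i else 0)) := by
  induction s generalizing k i with
  | nil => simp [splitNl]
  | cons c r ih =>
    by_cases hc : c = '\n'
    · subst hc
      rw [List.foldl_cons, if_pos rfl]
      show List.foldl _ (k + 1, 0) r = _
      rw [ih]
      have hlast : (splitNl ('\n' :: r)).getLastD [] = (splitNl r).getLastD [] := by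
        rw [splitNl_nl]
        exact getLastD_cons_ne _ _ _ (splitNl_ne_nil r)
      rw [hlast]
      refine Prod.ext ?_ ?_
      · simp [List.count_cons_self]; omega
      · simp [List.count_cons_self]
    · rw [List.foldl_cons, if_neg hc]
      show List.foldl _ (k, i + 1) r = _
      rw [ih]
      have hcnt : (c :: r).count '\n' = r.count '\n' := by simp [hc]
      by_cases h0 : r.count '\n' = 0
      · have hlen1 : (splitNl r).length = 1 := by rw [length_splitNl, h0]
        obtain ⟨p, hp⟩ := List.length_eq_one_iff.mp hlen1
        have hlast : (splitNl (c :: r)).getLastD [] = c :: p := by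
          rw [splitNl_cons c r hc, hp]
          simp
        have hlast2 : (splitNl r).getLastD [] = p := by rw [hp]; simp
        rw [hlast, hlast2]
        refine Prod.ext ?_ ?_
        · simp [hcnt]
        · simp [hcnt, h0]; omega
      · have htail : (splitNl r).tail ≠ [] := by
          intro hcon
          have := congrArg List.length (headI_tail_eq _ (splitNl_ne_nil r))
          rw [hcon] at this
          simp only [List.length_cons, List.length_nil] at this
          rw [length_splitNl] at this
          omega
        have hlast : (splitNl (c :: r)).getLastD [] = (splitNl r).getLastD [] := by
          rw [splitNl_cons c r hc, getLastD_cons_ne _ _ _ htail]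
          conv_rhs => rw [← headI_tail_eq _ (splitNl_ne_nil r)]
          rw [getLastD_cons_ne _ _ _ htail]
        rw [hlast]
        refine Prod.ext ?_ ?_
        · simp [hcnt]
        · simp [hcnt, h0]

-- ===== pass 2 of B: consuming one line of the machine =====

-- first line (line = 0): all-whitespace chars are skipped
lemma run_first (ind n : Nat) (p r : List Char) (col : Nat)
    (hnl : '\n' ∉ p) (hws : ∀ c ∈ p, PySem.Chars.isspace c = true) :
    dedentRun ind n 0 col (p ++ r) = dedentRun ind n 0 (col + p.length) r := by
  induction p generalizing col with
  | nil => simp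
  | cons c q ih =>
    have hc : c ≠ '\n' := fun h => hnl (h ▸ List.mem_cons_self)
    rw [List.cons_append, dedentRun, if_neg hc, if_pos (Or.inl rfl),
      if_neg (by simp [hws c List.mem_cons_self])]
    rw [ih (col + 1) (fun h => hnl (List.mem_cons.mpr (Or.inr h)))
      (fun c hc => hws c (List.mem_cons.mpr (Or.inr hc)))]
    congr 1
    simp; omega

-- last line (line = n ≥ 1): all-whitespace chars are skipped, nothing remains
lemma run_last (ind n : Nat) (p : List Char) (col : Nat) (hn : 1 ≤ n)
    (hnl : '\n' ∉ p) (hws : ∀ c ∈ p, PySem.Chars.isspace c = true) :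
    dedentRun ind n n col p = some [] := by
  induction p generalizing col with
  | nil => simp [dedentRun]
  | cons c q ih =>
    have hc : c ≠ '\n' := fun h => hnl (h ▸ List.mem_cons_self)
    rw [dedentRun, if_neg hc, if_pos (Or.inr (Or.inl rfl)),
      if_neg (by simp [hws c List.mem_cons_self])]
    exact ih (col + 1) (fun h => hnl (List.mem_cons.mpr (Or.inr h)))
      (fun c hc => hws c (List.mem_cons.mpr (Or.inr hc)))

-- interior line (1 ≤ line < n): the first ind columns are skipped, the rest emitted
lemma run_interior (ind n line : Nat) (p r : List Char) (col : Nat)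
    (h1 : 1 ≤ line) (h2 : line < n) (hnl : '\n' ∉ p)
    (hws : ∀ i (h : i < p.length), col + i < ind → PySem.Chars.isspace p[i] = true) :
    dedentRun ind n line col (p ++ r) =
      match dedentRun ind n line (col + p.length) r with
      | none => none
      | some o => some (p.drop (ind - col) ++ o) := by
  induction p generalizing col with
  | nil =>
    simp only [List.nil_append, List.length_nil, Nat.add_zero, List.drop_nil]
    cases dedentRun ind n line col r <;> simp
  | cons c q ih =>
    have hc : c ≠ '\n' := fun h => hnl (h ▸ List.mem_cons_self)
    have hn0 : line ≠ 0 := by omega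
    have hnn : line ≠ n := by omega
    have hnlq : '\n' ∉ q := fun h => hnl (List.mem_cons.mpr (Or.inr h))
    by_cases hcol : col < ind
    · have hwsc : PySem.Chars.isspace c = true := by
        have := hws 0 (by simp) (by simpa using hcol)
        simpa using this
      rw [List.cons_append, dedentRun, if_neg hc, if_pos (Or.inr (Or.inr hcol)),
        if_neg (by simp [hwsc])]
      rw [ih (col + 1) hnlq
        (fun i hi hlt => by
          have := hws (i + 1) (by simpa using Nat.succ_lt_succ hi) (by omega)
          simpa using this)]
      have hd : (c :: q).drop (ind - col) = q.drop (ind - (col + 1)) := by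
        have : ind - col = (ind - (col + 1)) + 1 := by omega
        rw [this, List.drop_succ_cons]
      have hl : col + (c :: q).length = (col + 1) + q.length := by simp; omega
      rw [hd, hl]
    · rw [List.cons_append, dedentRun, if_neg hc,
        if_neg (by simp only [not_or]; exact ⟨hn0, hnn, by omega⟩), if_pos ⟨h1, h2⟩]
      rw [ih (col + 1) hnlq (fun i hi hlt => by omega)]
      have hd : (c :: q).drop (ind - col) = c :: q.drop (ind - (col + 1)) := by
        have h3 : ind - col = 0 := by omega
        have h4 : ind - (col + 1) = 0 := by omega
        simp [h3, h4]
      have hl : col + (c :: q).length = (col + 1) + q.length := by simp; omega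
      rw [hd, hl]
      cases dedentRun ind n line (col + 1 + q.length) r <;> simp

-- the newline step
lemma run_newline (ind n line col : Nat) (r : List Char) :
    dedentRun ind n line col ('\n' :: r) =
      if 1 ≤ line ∧ line < n - 1 then
        match dedentRun ind n (line + 1) 0 r with
        | none => none
        | some o => some ('\n' :: o)
      else dedentRun ind n (line + 1) 0 r := by
  simp [dedentRun]

-- the machine over the interior lines joined by newlines, ending in the last line
lemma run_mid (ind n : Nat) (last : List Char)
    (hlastnl : '\n' ∉ last) (hlastws : ∀ c ∈ last, PySem.Chars.isspace c = true) :
    ∀ (mid : List (List Char)) (j : Nat), 1 ≤ j → j + mid.length = n →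
      (∀ p ∈ mid, '\n' ∉ p ∧ ∀ c ∈ p.take ind, PySem.Chars.isspace c = true) →
      dedentRun ind n j 0 (List.intercalate ['\n'] (mid ++ [last])) =
        some (List.intercalate ['\n'] (mid.map (List.drop ind))) := by
  intro mid
  induction mid with
  | nil =>
    intro j hj hlen hmid
    simp only [List.length_nil, Nat.add_zero] at hlen
    subst hlen
    simpa [List.intercalate] using run_last ind j last 0 hj hlastnl hlastws
  | cons p mid' ih =>
    intro j hj hlen hmid
    have hp := hmid p List.mem_cons_self
    have hinter : List.intercalate ['\n'] ((p :: mid') ++ [last]) =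
        p ++ '\n' :: List.intercalate ['\n'] (mid' ++ [last]) := by
      cases mid' <;> simp [intercalate_cons2, List.intercalate]
    rw [hinter]
    have hlen' : j + (mid'.length + 1) = n := by simpa using hlen
    have hjlt : j < n := by omega
    rw [run_interior ind n j p _ 0 hj hjlt hp.1
      (fun i hi hlt => hp.2 p[i] (by
        rw [List.mem_take_iff_getElem]
        exact ⟨i, by omega, rfl⟩))]
    rw [run_newline]
    cases mid' with
    | nil =>
      have hjn : j + 1 = n := by simpa using hlen'
      rw [if_neg (by omega)]
      have hlast : List.intercalate ['\n'] (([] : List (List Char)) ++ [last]) = last := by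
        simp [List.intercalate]
      rw [hlast, hjn, run_last ind n last 0 (by omega) hlastnl hlastws]
      simp [List.intercalate]
    | cons q mid'' =>
      have hlen'' : j + 1 + (q :: mid'').length = n := by simp at hlen' ⊢; omega
      rw [if_pos ⟨hj, by simp at hlen''; omega⟩]
      rw [ih (j + 1) (by omega) hlen'' (fun p hp => hmid p (List.mem_cons.mpr (Or.inr hp)))]
      have hmap : List.intercalate ['\n'] ((p :: q :: mid'').map (List.drop ind)) =
          p.drop ind ++ '\n' :: List.intercalate ['\n'] ((q :: mid'').map (List.drop ind)) := by
        simp [intercalate_cons2]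
      rw [hmap]
      simp

-- intercalate over a cons with any nonempty tail
lemma intercalate_cons_ne (p : List Char) (l : List (List Char)) (h : l ≠ []) :
    ['\n'].intercalate (p :: l) = p ++ '\n' :: ['\n'].intercalate l := by
  cases l with
  | nil => exact absurd rfl h
  | cons q qs => exact intercalate_cons2 p q qs

lemma ofList_eq_of_toList (s : String) (l : List Char) (h : s.toList = l) :
    s = String.ofList l := by
  rw [← h, String.ofList_toList]

-- Str.join "\n" over ofList pieces is ofList of the intercalation
lemma join_ofList (l : List (List Char)) :
    PySem.Str.join "\n" (l.map String.ofList) =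
      String.ofList (List.intercalate ['\n'] l) := by
  simp only [PySem.Str.join, PySem.Chars.join, List.map_map]
  have hm : l.map (String.toList ∘ String.ofList) = l := by
    simp [Function.comp_def, String.toList_ofList]
  rw [hm]
  rfl

-- ===== VERDICT (by name: the statement is the Claim_ definition above) =====
theorem dedent_py_spec : Claim_equal_dedent_py := by
  intro text _ hpre
  unfold Spec_dedent_py
  unfold Pre_dedent_py at hpre
  rw [splitOn_eq_splitNl] at hpre
  unfold dedent_py dedent_py_alt
  simp only [splitOn_eq_splitNl]
  rw [foldl_pass1]
  simp only [Nat.zero_add]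
  by_cases h0 : text.toList.count '\n' = 0
  · -- single-line: both return (0, text)
    have hlen1 : ((splitNl text.toList).map String.ofList).length = 1 := by
      simp [length_splitNl, h0]
    rw [if_pos hlen1, if_pos h0]
    obtain ⟨p, hp⟩ := List.length_eq_one_iff.mp
      (show (splitNl text.toList).length = 1 by simpa using hlen1)
    have hps : p = text.toList := by
      have := intercalate_splitNl text.toList
      rw [hp] at this
      simpa [List.intercalate] using this
    rw [hp, hps]
    refine Prod.ext rfl ?_
    show PySem.Str.join "\n" [String.ofList text.toList] = text
    rw [show [String.ofList text.toList] = [text.toList].map String.ofList from rfl, join_ofList]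
    simp [List.intercalate, String.ofList_toList]
  · -- multi-line
    have hpne := splitNl_ne_nil text.toList
    have hlenL : ¬ ((splitNl text.toList).map String.ofList).length = 1 := by
      simp [length_splitNl, h0]
    rw [if_neg hlenL, if_neg h0]
    rcases hpre with h | ⟨hfirst, hlast, hall⟩
    · exact absurd h hlenL
    obtain ⟨first, rest, hrest⟩ : ∃ a l, splitNl text.toList = a :: l := by
      cases h : splitNl text.toList with
      | nil => exact absurd h hpne
      | cons a l => exact ⟨a, l, rfl⟩
    have hrestne : rest ≠ [] := by
      intro hcon
      rw [hcon] at hrest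
      have := length_splitNl text.toList
      rw [hrest] at this
      simp at this
      omega
    have hdecomp : splitNl text.toList = first :: (rest.dropLast ++ [rest.getLast hrestne]) := by
      rw [hrest, List.dropLast_append_getLast hrestne]
    set mid := rest.dropLast with hmid
    set lastp := rest.getLast hrestne with hlastp
    have hL : (splitNl text.toList).map String.ofList =
        String.ofList first :: (mid.map String.ofList ++ [String.ofList lastp]) := by
      rw [hdecomp]; simp
    have hget0 : PySem.List.pyGetD ((splitNl text.toList).map String.ofList) 0 "" =
        String.ofList first := by
      rw [hL, pyGetD_zero_of_ne_nil _ _ (by simp)]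
      simp
    have hgetm1 : PySem.List.pyGetD ((splitNl text.toList).map String.ofList) (-1) "" =
        String.ofList lastp := by
      rw [hL, pyGetD_neg_one_of_ne_nil _ _ (by simp)]
      rw [getLast_eq_getLastD _ _ "", ← List.cons_append, List.getLastD_eq_getLast?,
        List.getLast?_concat]
      rfl
    have hfirst' : PySem.Str.strip (String.ofList first) = "" := by
      rw [← hget0]; exact hfirst
    have hlast' : PySem.Str.strip (String.ofList lastp) = "" := by
      rw [← hgetm1]; exact hlast
    have hfirstws : ∀ c ∈ first, PySem.Chars.isspace c = true := by
      apply (strip_eq_nil_iff first).mp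
      have := congrArg String.toList hfirst'
      simpa [PySem.Str.toList_strip, String.toList_ofList] using this
    have hlastws : ∀ c ∈ lastp, PySem.Chars.isspace c = true := by
      apply (strip_eq_nil_iff lastp).mp
      have := congrArg String.toList hlast'
      simpa [PySem.Str.toList_strip, String.toList_ofList] using this
    rw [if_neg (by rw [hget0, hfirst']; simp), if_neg (by rw [hgetm1, hlast']; simp)]
    -- normalize the indent expression everywhere
    rw [hgetm1] at hall ⊢
    simp only [PySem.Str.len_eq, String.toList_ofList] at hall ⊢
    -- A's any-guard is false
    have hany : ((List.map String.ofList (splitNl text.toList)).any fun line =>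
        PySem.Str.strip (PySem.Str.slice line none (some (lastp.length : Int))) != "") = false := by
      simp only [List.any_eq_false, bne_iff_ne, ne_eq, not_not]
      exact hall
    rw [if_neg (by rw [hany]; simp)]
    -- B's state
    have hgetLD : (splitNl text.toList).getLastD [] = lastp := by
      rw [hdecomp, ← List.cons_append, List.getLastD_eq_getLast?, List.getLast?_concat]
      rfl
    rw [hgetLD, if_neg h0, Nat.add_zero]
    -- shape facts
    have hn : List.count '\n' text.toList = mid.length + 1 := by
      have := length_splitNl text.toList
      rw [hdecomp] at this
      simp at this
      omega
    have hnl_first : '\n' ∉ first := not_mem_splitNl _ _ (by rw [hdecomp]; exact List.mem_cons_self)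
    have hnl_last : '\n' ∉ lastp := not_mem_splitNl _ _ (by rw [hdecomp]; simp)
    have hsdec : text.toList = first ++ '\n' :: List.intercalate ['\n'] (mid ++ [lastp]) := by
      conv_lhs => rw [← intercalate_splitNl text.toList, hdecomp]
      exact intercalate_cons_ne _ _ (by simp)
    have hmidck : ∀ p ∈ mid, '\n' ∉ p ∧ ∀ c ∈ p.take lastp.length, PySem.Chars.isspace c = true := by
      intro p hp
      refine ⟨not_mem_splitNl _ _ (by rw [hdecomp]; simp [hp]), ?_⟩
      apply (strip_eq_nil_iff _).mp
      have hmem : String.ofList p ∈ List.map String.ofList (splitNl text.toList) :=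
        List.mem_map_of_mem (by rw [hdecomp]; simp [hp])
      have h2 := hall _ hmem
      have h3 := congrArg String.toList h2
      simpa [PySem.Str.toList_strip, PySem.Str.toList_slice, PySem.Chars.slice_eq_listSlice,
        PySem.List.slice_to, String.toList_ofList] using h3
    -- run the machine over the decomposed text
    have hrun : dedentRun lastp.length (mid.length + 1) 0 0 text.toList =
        some (List.intercalate ['\n'] (mid.map (List.drop lastp.length))) := by
      conv_lhs => rw [hsdec]
      rw [run_first lastp.length (mid.length + 1) first _ 0 hnl_first hfirstws,
        run_newline, if_neg (by omega)]
      exact run_mid lastp.length _ lastp hnl_last hlastws mid 1 (by omega) (by omega) hmidck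
    rw [hn, hrun]
    refine Prod.ext rfl ?_
    -- the strings agree
    show PySem.Str.join "\n" _ = String.ofList _
    rw [slice_one_neg_one, hL, List.map_cons, List.map_append, List.tail_cons]
    simp only [List.map_cons, List.map_nil]
    rw [List.dropLast_concat]
    have hfmap : (mid.map String.ofList).map
        (fun line => PySem.Str.slice line (some (lastp.length : Int)) none) =
        (mid.map (List.drop lastp.length)).map String.ofList := by
      simp only [List.map_map]
      apply List.map_congr_left
      intro p hp
      apply ofList_eq_of_toList
      simp [PySem.Str.toList_slice, PySem.Chars.slice_eq_listSlice,
        PySem.List.slice_from_natCast, String.toList_ofList]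
    rw [hfmap, join_ofList]
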